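-- pv_equiv track=rewrite | github.com/510908220/DjBoxDownloader | song.py | _get_download_url
-- ===== SOURCE A (Python) =====
-- def _get_download_url(music_id, inner_url):
-- 	def get_server_urls():
-- 		urls = {}
-- 		for index in range(1, 20, 1):
-- 			url = "http://a64-%d.jyw8.com:8080/" % index
-- 			urls[index] = url
-- 		return urls
--
-- 	download_url = inner_url
-- 	server_urls = get_server_urls()
--
-- 	if 97160 < music_id <= 105558:
-- 		download_url = server_urls[2] + download_url
-- 	elif 105558 < music_id <= 113933:
-- 		download_url = server_urls[3] + download_url
-- 	elif 113933 < music_id <= 123781: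
-- 		download_url = server_urls[4] + download_url
-- 	elif 123781 < music_id <= 129389:
-- 		download_url = server_urls[5] + download_url
-- 	elif 129389 < music_id <= 138471:
-- 		download_url = server_urls[6] + download_url
-- 	elif 138471 < music_id <= 144784:
-- 		download_url = server_urls[7] + download_url
-- 	elif 144784 < music_id <= 151966:
-- 		download_url = server_urls[8] + download_url
-- 	elif 151966 < music_id <= 160431:
-- 		download_url = server_urls[9] + download_url
-- 	elif 160431 < music_id <= 167639:
-- 		download_url = server_urls[10] + download_url
-- 	elif 167639 < music_id <= 182926:
-- 		download_url = server_urls[11] + download_url;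
-- 	elif 182926 < music_id <= 198890:
-- 		download_url = server_urls[12] + download_url
-- 	elif 198890 < music_id <= 213214:
-- 		download_url = server_urls[13] + download_url
-- 	elif 213214 < music_id <= 227251:
-- 		download_url = server_urls[14] + download_url
-- 	elif 227251 < music_id <= 240890:
-- 		download_url = server_urls[15] + download_url
-- 	elif 240890 < music_id <= 268960:
-- 		download_url = server_urls[16] + download_url
-- 	elif music_id > 268960:
-- 		download_url = server_urls[17] + download_url
-- 	else:
-- 		download_url = server_urls[1] + download_url
-- 	return download_url
-- ===== SOURCE B (Python) =====
-- import bisect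
--
-- _THRESHOLDS = [97160, 105558, 113933, 123781, 129389, 138471, 144784, 151966,
--                160431, 167639, 182926, 198890, 213214, 227251, 240890, 268960]
--
-- def _get_download_url(music_id, inner_url):
--     server = bisect.bisect_left(_THRESHOLDS, music_id) + 1
--     return "http://a64-%d.jyw8.com:8080/" % server + inner_url
-- ===== Notes on version B (the rewrite author's own statement) =====
-- stated objective: idiomatic
-- what changed: Replaces the 17-branch comparison ladder and the dict of 19 preformatted server URLs with a sorted 16-entry threshold table and a bisect_left binary search that yields the server index directly.
import Mathlib
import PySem

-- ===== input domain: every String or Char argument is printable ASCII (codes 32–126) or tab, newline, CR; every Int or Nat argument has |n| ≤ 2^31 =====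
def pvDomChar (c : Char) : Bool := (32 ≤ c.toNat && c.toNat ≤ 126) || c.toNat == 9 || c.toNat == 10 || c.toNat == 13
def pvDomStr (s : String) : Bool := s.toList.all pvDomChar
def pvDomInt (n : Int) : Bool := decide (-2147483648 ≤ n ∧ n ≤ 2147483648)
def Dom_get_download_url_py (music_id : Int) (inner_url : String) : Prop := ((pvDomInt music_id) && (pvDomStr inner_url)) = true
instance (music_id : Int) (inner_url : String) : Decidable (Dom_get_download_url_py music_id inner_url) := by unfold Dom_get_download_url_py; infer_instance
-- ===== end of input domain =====

-- B replaces A's 17-branch comparison ladder (plus a dict of 19 preformatted URLs) by a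
-- bisect_left binary search over a 16-entry sorted threshold table (objective: idiomatic).

-- ===== PORT A =====
-- Python dict[k] would raise KeyError on a missing key; every key 1..17 used below is
-- inserted by the range(1, 20) loop, so the getD default "" is never taken.
def get_download_url_py (music_id : Int) (inner_url : String) : String :=
  let server_urls : PySem.Dict Int String :=
    (PySem.List.pyRange 1 20 1).foldl
      (fun urls index =>
        urls.insert index ("http://a64-" ++ PySem.Int.toStr index ++ ".jyw8.com:8080/"))
      PySem.Dict.empty
  let download_url := inner_url
  if 97160 < music_id ∧ music_id ≤ 105558 then server_urls.getD 2 "" ++ download_url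
  else if 105558 < music_id ∧ music_id ≤ 113933 then server_urls.getD 3 "" ++ download_url
  else if 113933 < music_id ∧ music_id ≤ 123781 then server_urls.getD 4 "" ++ download_url
  else if 123781 < music_id ∧ music_id ≤ 129389 then server_urls.getD 5 "" ++ download_url
  else if 129389 < music_id ∧ music_id ≤ 138471 then server_urls.getD 6 "" ++ download_url
  else if 138471 < music_id ∧ music_id ≤ 144784 then server_urls.getD 7 "" ++ download_url
  else if 144784 < music_id ∧ music_id ≤ 151966 then server_urls.getD 8 "" ++ download_url
  else if 151966 < music_id ∧ music_id ≤ 160431 then server_urls.getD 9 "" ++ download_url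
  else if 160431 < music_id ∧ music_id ≤ 167639 then server_urls.getD 10 "" ++ download_url
  else if 167639 < music_id ∧ music_id ≤ 182926 then server_urls.getD 11 "" ++ download_url
  else if 182926 < music_id ∧ music_id ≤ 198890 then server_urls.getD 12 "" ++ download_url
  else if 198890 < music_id ∧ music_id ≤ 213214 then server_urls.getD 13 "" ++ download_url
  else if 213214 < music_id ∧ music_id ≤ 227251 then server_urls.getD 14 "" ++ download_url
  else if 227251 < music_id ∧ music_id ≤ 240890 then server_urls.getD 15 "" ++ download_url
  else if 240890 < music_id ∧ music_id ≤ 268960 then server_urls.getD 16 "" ++ download_url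
  else if music_id > 268960 then server_urls.getD 17 "" ++ download_url
  else server_urls.getD 1 "" ++ download_url

-- ===== PORT B =====
def pvThresholds : List Int :=
  [97160, 105558, 113933, 123781, 129389, 138471, 144784, 151966,
   160431, 167639, 182926, 198890, 213214, 227251, 240890, 268960]

def get_download_url_py_alt (music_id : Int) (inner_url : String) : String :=
  let server : Int := (PySem.List.bisectLeft pvThresholds music_id : Int) + 1
  ("http://a64-" ++ PySem.Int.toStr server ++ ".jyw8.com:8080/") ++ inner_url

-- ===== PRECONDITION & SPEC =====
def Spec_get_download_url_py (music_id : Int) (inner_url : String) (out : String) : Prop := out = get_download_url_py_alt music_id inner_url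
instance (music_id : Int) (inner_url : String) (out : String) : Decidable (Spec_get_download_url_py music_id inner_url out) := by unfold Spec_get_download_url_py; infer_instance

-- ===== CLAIM (what is proved, stated in full; the proofs are below) =====
def Claim_equal_get_download_url_py : Prop := ∀ (music_id : Int) (inner_url : String), Dom_get_download_url_py music_id inner_url → Spec_get_download_url_py music_id inner_url (get_download_url_py music_id inner_url)

-- ===== LEMMAS AND PROOFS =====

-- pin the value of bisectLeft on a sorted list from the two boundary comparisons
lemma bl_pin (xs : List Int) (m : Int) (hs : xs.Pairwise (· ≤ ·)) (k : Nat)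
    (hk : k ≤ xs.length)
    (hlt : ∀ _ : 0 < k, xs[k-1]'(by omega) < m)
    (hge : ∀ h : k < xs.length, m ≤ xs[k]) :
    PySem.List.bisectLeft xs m = k := by
  obtain ⟨hle, hA, hB⟩ := PySem.List.bisectLeft_spec xs m hs
  set b := PySem.List.bisectLeft xs m with hb
  rcases Nat.lt_trichotomy b k with h | h | h
  · have h1 : m ≤ xs[b]'(by omega) := hB b (by omega) (le_refl _)
    have h2 : xs[k-1]'(by omega) < m := hlt (by omega)
    have h3 : xs[b]'(by omega) ≤ xs[k-1]'(by omega) := by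
      rcases Nat.eq_or_lt_of_le (Nat.le_pred_of_lt h) with he | hl
      · simp [he]
      · exact (List.pairwise_iff_getElem.mp hs) b (k-1) (by omega) (by omega) hl
    omega
  · exact h
  · have h1 : xs[k]'(by omega) < m := hA k (by omega) h
    have h2 : m ≤ xs[k]'(by omega) := hge (by omega)
    omega

lemma pv_sorted : pvThresholds.Pairwise (· ≤ ·) := by decide

-- ===== VERDICT (by name: the statement is the Claim_ definition above) =====
-- index ladder of A, used only by the proof
def pvIdxA (m : Int) : Int :=
  if 97160 < m ∧ m ≤ 105558 then 2
  else if 105558 < m ∧ m ≤ 113933 then 3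
  else if 113933 < m ∧ m ≤ 123781 then 4
  else if 123781 < m ∧ m ≤ 129389 then 5
  else if 129389 < m ∧ m ≤ 138471 then 6
  else if 138471 < m ∧ m ≤ 144784 then 7
  else if 144784 < m ∧ m ≤ 151966 then 8
  else if 151966 < m ∧ m ≤ 160431 then 9
  else if 160431 < m ∧ m ≤ 167639 then 10
  else if 167639 < m ∧ m ≤ 182926 then 11
  else if 182926 < m ∧ m ≤ 198890 then 12
  else if 198890 < m ∧ m ≤ 213214 then 13
  else if 213214 < m ∧ m ≤ 227251 then 14
  else if 227251 < m ∧ m ≤ 240890 then 15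
  else if 240890 < m ∧ m ≤ 268960 then 16
  else if m > 268960 then 17
  else 1

def pvUrl (k : Int) : String := "http://a64-" ++ PySem.Int.toStr k ++ ".jyw8.com:8080/"

lemma idx_eq (m : Int) : pvIdxA m = ((PySem.List.bisectLeft pvThresholds m : Int) + 1) := by
  unfold pvIdxA
  by_cases h1 : 97160 < m ∧ m ≤ 105558
  · rw [if_pos h1]
    rw [bl_pin pvThresholds m pv_sorted 1 (by decide)
        (fun h => by simp [pvThresholds]; omega)
        (fun h => by simp [pvThresholds]; omega)]
    decide
  · rw [if_neg h1]
    by_cases h2 : 105558 < m ∧ m ≤ 113933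
    · rw [if_pos h2]
      rw [bl_pin pvThresholds m pv_sorted 2 (by decide)
          (fun h => by simp [pvThresholds]; omega)
          (fun h => by simp [pvThresholds]; omega)]
      decide
    · rw [if_neg h2]
      by_cases h3 : 113933 < m ∧ m ≤ 123781
      · rw [if_pos h3]
        rw [bl_pin pvThresholds m pv_sorted 3 (by decide)
            (fun h => by simp [pvThresholds]; omega)
            (fun h => by simp [pvThresholds]; omega)]
        decide
      · rw [if_neg h3]
        by_cases h4 : 123781 < m ∧ m ≤ 129389
        · rw [if_pos h4]
          rw [bl_pin pvThresholds m pv_sorted 4 (by decide)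
              (fun h => by simp [pvThresholds]; omega)
              (fun h => by simp [pvThresholds]; omega)]
          decide
        · rw [if_neg h4]
          by_cases h5 : 129389 < m ∧ m ≤ 138471
          · rw [if_pos h5]
            rw [bl_pin pvThresholds m pv_sorted 5 (by decide)
                (fun h => by simp [pvThresholds]; omega)
                (fun h => by simp [pvThresholds]; omega)]
            decide
          · rw [if_neg h5]
            by_cases h6 : 138471 < m ∧ m ≤ 144784
            · rw [if_pos h6]
              rw [bl_pin pvThresholds m pv_sorted 6 (by decide)
                  (fun h => by simp [pvThresholds]; omega)
                  (fun h => by simp [pvThresholds]; omega)]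
              decide
            · rw [if_neg h6]
              by_cases h7 : 144784 < m ∧ m ≤ 151966
              · rw [if_pos h7]
                rw [bl_pin pvThresholds m pv_sorted 7 (by decide)
                    (fun h => by simp [pvThresholds]; omega)
                    (fun h => by simp [pvThresholds]; omega)]
                decide
              · rw [if_neg h7]
                by_cases h8 : 151966 < m ∧ m ≤ 160431
                · rw [if_pos h8]
                  rw [bl_pin pvThresholds m pv_sorted 8 (by decide)
                      (fun h => by simp [pvThresholds]; omega)
                      (fun h => by simp [pvThresholds]; omega)]
                  decide
                · rw [if_neg h8]
                  by_cases h9 : 160431 < m ∧ m ≤ 167639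
                  · rw [if_pos h9]
                    rw [bl_pin pvThresholds m pv_sorted 9 (by decide)
                        (fun h => by simp [pvThresholds]; omega)
                        (fun h => by simp [pvThresholds]; omega)]
                    decide
                  · rw [if_neg h9]
                    by_cases h10 : 167639 < m ∧ m ≤ 182926
                    · rw [if_pos h10]
                      rw [bl_pin pvThresholds m pv_sorted 10 (by decide)
                          (fun h => by simp [pvThresholds]; omega)
                          (fun h => by simp [pvThresholds]; omega)]
                      decide
                    · rw [if_neg h10]
                      by_cases h11 : 182926 < m ∧ m ≤ 198890
                      · rw [if_pos h11]
                        rw [bl_pin pvThresholds m pv_sorted 11 (by decide)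
                            (fun h => by simp [pvThresholds]; omega)
                            (fun h => by simp [pvThresholds]; omega)]
                        decide
                      · rw [if_neg h11]
                        by_cases h12 : 198890 < m ∧ m ≤ 213214
                        · rw [if_pos h12]
                          rw [bl_pin pvThresholds m pv_sorted 12 (by decide)
                              (fun h => by simp [pvThresholds]; omega)
                              (fun h => by simp [pvThresholds]; omega)]
                          decide
                        · rw [if_neg h12]
                          by_cases h13 : 213214 < m ∧ m ≤ 227251
                          · rw [if_pos h13]
                            rw [bl_pin pvThresholds m pv_sorted 13 (by decide)
                                (fun h => by simp [pvThresholds]; omega)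
                                (fun h => by simp [pvThresholds]; omega)]
                            decide
                          · rw [if_neg h13]
                            by_cases h14 : 227251 < m ∧ m ≤ 240890
                            · rw [if_pos h14]
                              rw [bl_pin pvThresholds m pv_sorted 14 (by decide)
                                  (fun h => by simp [pvThresholds]; omega)
                                  (fun h => by simp [pvThresholds]; omega)]
                              decide
                            · rw [if_neg h14]
                              by_cases h15 : 240890 < m ∧ m ≤ 268960
                              · rw [if_pos h15]
                                rw [bl_pin pvThresholds m pv_sorted 15 (by decide)
                                    (fun h => by simp [pvThresholds]; omega)
                                    (fun h => by simp [pvThresholds]; omega)]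
                                decide
                              · rw [if_neg h15]
                                by_cases h16 : m > 268960
                                · rw [if_pos h16]
                                  rw [bl_pin pvThresholds m pv_sorted 16 (by decide)
                                      (fun h => by simp [pvThresholds]; omega)
                                      (fun h => absurd h (by decide))]
                                  decide
                                · rw [if_neg h16]
                                  rw [bl_pin pvThresholds m pv_sorted 0 (by decide)
                                      (fun h => absurd h (by decide))
                                      (fun h => by simp [pvThresholds]; omega)]
                                  decide

set_option maxHeartbeats 1000000 in
theorem get_download_url_py_spec : Claim_equal_get_download_url_py := by
  intro m u _
  show get_download_url_py m u = get_download_url_py_alt m u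
  have hB : get_download_url_py_alt m u
      = pvUrl ((PySem.List.bisectLeft pvThresholds m : Int) + 1) ++ u := rfl
  rw [hB, ← idx_eq]
  simp only [get_download_url_py, pvIdxA, apply_ite (fun k => pvUrl k ++ u)]
  congr 1
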